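-- pv_equiv track=rewrite | github.com/Hawyuscribe/newreader | django_neurology_mcq/mcq/cognitive_analysis.py | _get_treatment_mechanisms
-- ===== SOURCE A (Python) =====
-- def _get_treatment_mechanisms(options: dict) -> list:
--     """Get treatment mechanisms"""
--     mechanisms = []
--     for option in options.values():
--         option_lower = option.lower()
--         if 'psychotherapy' in option_lower or 'therapy' in option_lower:
--             mechanisms.append("Psychological")
--         elif 'propranolol' in option_lower:
--             mechanisms.append("Beta-blocker")
--         elif any(drug in option_lower for drug in ['sertraline', 'ssri']):
--             mechanisms.append("SSRI")
--         elif any(drug in option_lower for drug in ['lithium']):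
--             mechanisms.append("Mood stabilizer")
--         else:
--             mechanisms.append("Pharmacological")
--     return mechanisms
-- ===== SOURCE B (Python) =====
-- # Painter's algorithm: paint the default label everywhere, then sweep the rules
-- # from LOWEST to HIGHEST priority, overwriting the label of every matching value;
-- # the final (highest-priority) write wins. 'therapy' subsumes 'psychotherapy'.
-- _PASSES = [
--     (("lithium",), "Mood stabilizer"),
--     (("sertraline", "ssri"), "SSRI"),
--     (("propranolol",), "Beta-blocker"),
--     (("therapy",), "Psychological"),
-- ]
--
-- def _get_treatment_mechanisms(options: dict) -> list:
--     values = [v.lower() for v in options.values()]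
--     labels = ["Pharmacological"] * len(values)
--     for keywords, label in _PASSES:
--         for i, v in enumerate(values):
--             if any(k in v for k in keywords):
--                 labels[i] = label
--     return labels
-- ===== Notes on version B (the rewrite author's own statement) =====
-- stated objective: alternative
-- what changed: Replaces the per-value elif cascade by a painter's algorithm: pre-fill every slot with the default label, then sweep the rules from lowest to highest priority over all values, overwriting matching slots so the last (highest-priority) write wins.
import Mathlib
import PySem

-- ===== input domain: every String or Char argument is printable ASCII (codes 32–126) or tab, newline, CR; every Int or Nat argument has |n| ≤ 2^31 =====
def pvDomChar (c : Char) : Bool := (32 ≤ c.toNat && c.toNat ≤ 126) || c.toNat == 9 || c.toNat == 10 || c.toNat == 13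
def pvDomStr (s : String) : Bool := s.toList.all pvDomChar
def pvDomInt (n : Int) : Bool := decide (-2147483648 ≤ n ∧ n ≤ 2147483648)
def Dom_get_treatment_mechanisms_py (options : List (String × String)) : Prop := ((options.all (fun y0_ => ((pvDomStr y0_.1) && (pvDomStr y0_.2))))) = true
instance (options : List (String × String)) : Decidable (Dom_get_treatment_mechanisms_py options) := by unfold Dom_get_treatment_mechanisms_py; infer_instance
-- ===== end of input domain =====

-- B replaces A's per-value elif cascade by a painter's algorithm: default label everywhere, then overwrite passes from lowest to highest priority; objective: alternative, same cost.
-- ===== PORT A =====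
-- A builds `mechanisms` through an if/elif cascade over options.values().
def get_treatment_mechanisms_py (options : List (String × String)) : List String :=
  (PySem.Dict.ofList options).values.foldl (fun mechanisms option =>
    let option_lower := PySem.Str.lower option
    if PySem.Str.isIn "psychotherapy" option_lower || PySem.Str.isIn "therapy" option_lower then
      mechanisms ++ ["Psychological"]
    else if PySem.Str.isIn "propranolol" option_lower then
      mechanisms ++ ["Beta-blocker"]
    else if ["sertraline", "ssri"].any (fun drug => PySem.Str.isIn drug option_lower) then
      mechanisms ++ ["SSRI"]
    else if ["lithium"].any (fun drug => PySem.Str.isIn drug option_lower) then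
      mechanisms ++ ["Mood stabilizer"]
    else
      mechanisms ++ ["Pharmacological"]) []

-- ===== PORT B =====
-- B: overwrite passes in reverse priority order ('therapy' subsumes 'psychotherapy').
def pvPasses : List (List String × String) :=
  [(["lithium"], "Mood stabilizer"),
   (["sertraline", "ssri"], "SSRI"),
   (["propranolol"], "Beta-blocker"),
   (["therapy"], "Psychological")]

def get_treatment_mechanisms_py_alt (options : List (String × String)) : List String :=
  let values := (PySem.Dict.ofList options).values.map PySem.Str.lower
  pvPasses.foldl (fun labels rule =>
    List.zipWith (fun v lab =>
      if rule.1.any (fun k => PySem.Str.isIn k v) then rule.2 else lab) values labels)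
    (values.map (fun _ => "Pharmacological"))

-- ===== PRECONDITION & SPEC =====
def Spec_get_treatment_mechanisms_py (options : List (String × String)) (out : List String) : Prop := out = get_treatment_mechanisms_py_alt options
instance (options : List (String × String)) (out : List String) : Decidable (Spec_get_treatment_mechanisms_py options out) := by unfold Spec_get_treatment_mechanisms_py; infer_instance

-- ===== CLAIM (what is proved, stated in full; the proofs are below) =====
def Claim_equal_get_treatment_mechanisms_py : Prop := ∀ (options : List (String × String)), Dom_get_treatment_mechanisms_py options → Spec_get_treatment_mechanisms_py options (get_treatment_mechanisms_py options)

-- ===== LEMMAS AND PROOFS =====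

-- A's cascade on one lowered value, as a function.
def pvCascade (s : String) : String :=
  if PySem.Str.isIn "psychotherapy" s || PySem.Str.isIn "therapy" s then "Psychological"
  else if PySem.Str.isIn "propranolol" s then "Beta-blocker"
  else if ["sertraline", "ssri"].any (fun drug => PySem.Str.isIn drug s) then "SSRI"
  else if ["lithium"].any (fun drug => PySem.Str.isIn drug s) then "Mood stabilizer"
  else "Pharmacological"

-- "therapy" is a substring of "psychotherapy", so a hit on the longer word implies one on the shorter.
theorem pv_psycho_imp_therapy (s : String) (h : PySem.Str.isIn "psychotherapy" s = true) :
    PySem.Str.isIn "therapy" s = true := by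
  rw [PySem.Str.isIn_iff_infix] at h ⊢
  exact List.IsInfix.trans (by decide) h

-- The four overwrite passes, composed on one element, compute A's cascade.
theorem pv_overwrite_eq (s : String) :
    (if PySem.Str.isIn "therapy" s then "Psychological"
     else if PySem.Str.isIn "propranolol" s then "Beta-blocker"
     else if PySem.Str.isIn "sertraline" s || PySem.Str.isIn "ssri" s then "SSRI"
     else if PySem.Str.isIn "lithium" s then "Mood stabilizer"
     else "Pharmacological") = pvCascade s := by
  unfold pvCascade
  cases hp : PySem.Str.isIn "psychotherapy" s with
  | true =>
    have ht := pv_psycho_imp_therapy s hp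
    simp only [ht, Bool.true_or, if_true]
  | false =>
    simp only [Bool.false_or, List.any_cons, List.any_nil, Bool.or_false]

-- A's append-fold is the map of the cascade.
theorem pv_A_eq_map (options : List (String × String)) :
    get_treatment_mechanisms_py options
      = (PySem.Dict.ofList options).values.map (fun v => pvCascade (PySem.Str.lower v)) := by
  unfold get_treatment_mechanisms_py
  have hstep : (fun (mechanisms : List String) (option : String) =>
      let option_lower := PySem.Str.lower option
      if PySem.Str.isIn "psychotherapy" option_lower || PySem.Str.isIn "therapy" option_lower then
        mechanisms ++ ["Psychological"]
      else if PySem.Str.isIn "propranolol" option_lower then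
        mechanisms ++ ["Beta-blocker"]
      else if ["sertraline", "ssri"].any (fun drug => PySem.Str.isIn drug option_lower) then
        mechanisms ++ ["SSRI"]
      else if ["lithium"].any (fun drug => PySem.Str.isIn drug option_lower) then
        mechanisms ++ ["Mood stabilizer"]
      else
        mechanisms ++ ["Pharmacological"])
      = (fun mechanisms option => mechanisms ++ [pvCascade (PySem.Str.lower option)]) := by
    funext mechanisms option
    unfold pvCascade
    dsimp only
    split_ifs <;> rfl
  rw [hstep]
  induction (PySem.Dict.ofList options).values using List.reverseRecOn with
  | nil => rfl
  | append_singleton vs v ih =>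
    rw [List.foldl_append, List.foldl_cons, List.foldl_nil, List.map_append, List.map_cons,
      List.map_nil, ih]

-- B's four zipWith passes compute the cascade pointwise.
theorem pv_B_eq_map (vals : List String) :
    pvPasses.foldl (fun labels rule =>
      List.zipWith (fun v lab =>
        if rule.1.any (fun k => PySem.Str.isIn k v) then rule.2 else lab) vals labels)
      (vals.map (fun _ => "Pharmacological"))
      = vals.map pvCascade := by
  induction vals with
  | nil => rfl
  | cons v vs ih =>
    simp only [pvPasses, List.foldl_cons, List.foldl_nil, List.map_cons, List.zipWith_cons_cons,
      List.any_cons, List.any_nil, Bool.or_false] at ih ⊢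
    rw [ih, pv_overwrite_eq v]

-- ===== VERDICT (by name: the statement is the Claim_ definition above) =====
theorem get_treatment_mechanisms_py_spec : Claim_equal_get_treatment_mechanisms_py := by
  intro options _
  unfold Spec_get_treatment_mechanisms_py
  unfold get_treatment_mechanisms_py_alt
  rw [pv_A_eq_map, pv_B_eq_map, List.map_map]
  rfl
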